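-- pv_equiv track=rewrite | github.com/Giovanni-Tedesco/Legendre-Pairs | vectors.py | circular_correlation
-- ===== SOURCE A (Python) =====
-- def circular_correlation(x, y):
--     l = len(x)
--     ret = []
--     for j in range(l):
--         s = 0
--         for i in range(l):
--             s += x[i] * y[(i + j) % l]
--
--         ret.append(s)
--
--     return ret
-- ===== SOURCE B (Python) =====
-- def circular_correlation(x, y):
--     # Scatter form: out = sum_i x[i] * (y rotated left by i), accumulated
--     # in a single pass over x while rotating a working copy of y.
--     l = len(x)
--     acc = [0] * l
--     rot = y[:l]
--     for xi in x:
--         acc = [a + xi * r for a, r in zip(acc, rot)]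
--         rot = rot[1:] + rot[:1]
--     return acc
-- ===== Notes on version B (the rewrite author's own statement) =====
-- stated objective: alternative
-- what changed: B computes the result in scatter form: a single pass over x accumulating xi times a left-rotating copy of y into the output vector, instead of A's gather form where each output entry is an inner sum with modular indexing y[(i+j)%l].
-- outside the precondition, e.g. on circular_correlation([1, 2], [5]): A raises IndexError, B returns [15]
import Mathlib
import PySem

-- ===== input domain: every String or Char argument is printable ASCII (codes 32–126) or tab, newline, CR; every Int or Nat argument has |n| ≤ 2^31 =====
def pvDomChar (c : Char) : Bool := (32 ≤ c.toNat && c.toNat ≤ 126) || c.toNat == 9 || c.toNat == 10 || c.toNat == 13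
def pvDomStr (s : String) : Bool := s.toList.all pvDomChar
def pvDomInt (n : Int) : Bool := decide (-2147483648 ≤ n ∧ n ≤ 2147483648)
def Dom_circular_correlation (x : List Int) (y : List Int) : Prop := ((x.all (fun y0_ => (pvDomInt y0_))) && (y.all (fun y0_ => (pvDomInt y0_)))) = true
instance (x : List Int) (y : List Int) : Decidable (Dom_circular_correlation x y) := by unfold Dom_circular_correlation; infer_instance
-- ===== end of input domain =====

-- B computes the result in scatter form — one pass over x accumulating xi * (rotating copy
-- of y) into an output vector — instead of A's gather form with an inner modular-index sum
-- (alternative decomposition; same asymptotic cost).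

-- ===== PORT A =====
-- literal transliteration of A: for j in range(l): s = 0; for i in range(l): s += x[i]*y[(i+j)%l]; ret.append(s)
def circular_correlation (x : List Int) (y : List Int) : List Int :=
  let l : Int := x.length
  (PySem.List.pyRange 0 l).foldl
    (fun ret j =>
      ret ++ [(PySem.List.pyRange 0 l).foldl
        (fun s i => s + PySem.List.pyGetD x i 0 * PySem.List.pyGetD y (PySem.Int.mod (i + j) l) 0) 0])
    []

-- ===== PORT B =====
-- literal transliteration of B: acc=[0]*l; rot=y[:l];
-- for xi in x: acc=[a+xi*r for a,r in zip(acc,rot)]; rot=rot[1:]+rot[:1]; return acc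
def circular_correlation_alt (x : List Int) (y : List Int) : List Int :=
  let l : Int := x.length
  let acc0 : List Int := List.replicate x.length 0
  let rot0 : List Int := PySem.List.slice y none (some l)
  (x.foldl
    (fun (st : List Int × List Int) xi =>
      ((st.1.zip st.2).map (fun p => p.1 + xi * p.2),
       PySem.List.slice st.2 (some 1) none ++ PySem.List.slice st.2 none (some 1)))
    (acc0, rot0)).1

-- ===== PRECONDITION & SPEC =====
-- Pre_ excludes len(y) < len(x), on which the Python A raises IndexError (y[(i+j)%len(x)] out of range).
def Pre_circular_correlation (x : List Int) (y : List Int) : Prop := x.length ≤ y.length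
instance (x : List Int) (y : List Int) : Decidable (Pre_circular_correlation x y) := by unfold Pre_circular_correlation; infer_instance
def pvWitness_circular_correlation : List Int × List Int := ([1, 2], [3, 4])

def Spec_circular_correlation (x : List Int) (y : List Int) (out : List Int) : Prop := out = circular_correlation_alt x y
instance (x : List Int) (y : List Int) (out : List Int) : Decidable (Spec_circular_correlation x y out) := by unfold Spec_circular_correlation; infer_instance

-- ===== CLAIM (what is proved, stated in full; the proofs are below) =====
def Claim_equal_circular_correlation : Prop := ∀ (x : List Int) (y : List Int), Dom_circular_correlation x y → Pre_circular_correlation x y → Spec_circular_correlation x y (circular_correlation x y)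

-- ===== LEMMAS AND PROOFS =====

-- left rotation by one, the pure form of B's 'rot = rot[1:] + rot[:1]'
def pvRotL (r : List Int) : List Int := r.drop 1 ++ r.take 1

theorem pvRotL_length (r : List Int) : (pvRotL r).length = r.length := by
  simp [pvRotL]; omega

theorem pvRotL_getD (r : List Int) (j : Nat) (hj : j < r.length) :
    (pvRotL r).getD j 0 = r.getD ((j + 1) % r.length) 0 := by
  have hn : 0 < r.length := by omega
  by_cases hc : j + 1 < r.length
  · rw [Nat.mod_eq_of_lt hc]
    unfold pvRotL
    rw [List.getD_eq_getElem _ 0 (by simp; omega), List.getD_eq_getElem _ 0 (by omega)]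
    rw [List.getElem_append, dif_pos (by simp; omega), List.getElem_drop]
    congr 1
    omega
  · have h0 : (j + 1) % r.length = 0 := by
      have h1 : j + 1 = r.length := by omega
      rw [h1, Nat.mod_self]
    rw [h0]
    unfold pvRotL
    rw [List.getD_eq_getElem _ 0 (by simp; omega), List.getD_eq_getElem _ 0 hn]
    rw [List.getElem_append, dif_neg (by simp; omega), List.getElem_take]
    congr 1
    simp; omega

theorem pvRotL_iter_getD (i : Nat) : ∀ (r : List Int) (j : Nat), j < r.length →
    ((pvRotL^[i]) r).getD j 0 = r.getD ((j + i) % r.length) 0 := by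
  induction i with
  | zero => intro r j hj; simp [Nat.mod_eq_of_lt hj]
  | succ i ih =>
    intro r j hj
    have hn : 0 < r.length := by omega
    rw [Function.iterate_succ_apply]
    rw [ih (pvRotL r) j (by rw [pvRotL_length]; exact hj), pvRotL_length]
    rw [pvRotL_getD r _ (Nat.mod_lt _ hn)]
    congr 1
    calc ((j + i) % r.length + 1) % r.length
        = (j + i + 1) % r.length := (Nat.mod_modEq (j + i) r.length).add_right 1
      _ = (j + (i + 1)) % r.length := by rw [Nat.add_assoc]

-- the accumulation invariant of B's single pass
theorem pvFoldB (xs : List Int) : ∀ (acc rot : List Int), rot.length = acc.length →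
    ((xs.foldl (fun (st : List Int × List Int) xi =>
        ((st.1.zip st.2).map (fun p => p.1 + xi * p.2), pvRotL st.2))
      (acc, rot)).1.length = acc.length ∧
     ∀ j < acc.length,
      (xs.foldl (fun (st : List Int × List Int) xi =>
          ((st.1.zip st.2).map (fun p => p.1 + xi * p.2), pvRotL st.2))
        (acc, rot)).1.getD j 0 =
        acc.getD j 0 +
          ((List.range xs.length).map
            (fun i => xs.getD i 0 * ((pvRotL^[i]) rot).getD j 0)).sum) := by
  induction xs with
  | nil => intro acc rot _; exact ⟨rfl, fun j _ => by simp⟩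
  | cons xi xs ih =>
    intro acc rot hlen
    have hacc' : ((acc.zip rot).map (fun p => p.1 + xi * p.2)).length = acc.length := by
      simp [hlen]
    have hrot' : (pvRotL rot).length = ((acc.zip rot).map (fun p => p.1 + xi * p.2)).length := by
      rw [pvRotL_length, hacc', hlen]
    obtain ⟨ihlen, ihget⟩ := ih ((acc.zip rot).map (fun p => p.1 + xi * p.2)) (pvRotL rot) hrot'
    simp only [List.foldl_cons]
    refine ⟨by rw [ihlen, hacc'], ?_⟩
    intro j hj
    rw [ihget j (by rw [hacc']; exact hj)]
    have hstep : ((acc.zip rot).map (fun p => p.1 + xi * p.2)).getD j 0 =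
        acc.getD j 0 + xi * rot.getD j 0 := by
      rw [List.getD_eq_getElem _ 0 (by rw [hacc']; exact hj)]
      rw [List.getElem_map, List.getElem_zip]
      rw [List.getD_eq_getElem _ 0 hj, List.getD_eq_getElem _ 0 (by omega)]
    rw [hstep]
    rw [List.length_cons, List.range_succ_eq_map, List.map_cons, List.sum_cons, List.map_map]
    simp only [Function.comp_def, List.getD_cons_succ, List.getD_cons_zero,
      Function.iterate_zero_apply, Function.iterate_succ_apply]
    ring

-- A's output as an explicit list of modular dot products
theorem pvA_eq (x y : List Int) (_h : x.length ≤ y.length) :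
    circular_correlation x y =
      (List.range x.length).map
        (fun j => ((List.range x.length).map
          (fun i => x.getD i 0 * y.getD ((i + j) % x.length) 0)).sum) := by
  unfold circular_correlation
  simp only []
  rw [show ((x.length : Int)) = ((x.length : Nat) : Int) from rfl]
  rw [PySem.List.pyRange_zero_natCast]
  rw [PySem.List.foldl_append_singleton_eq_map, List.nil_append, List.map_map]
  apply List.map_congr_left
  intro j hj
  rw [List.mem_range] at hj
  have hn : 0 < x.length := by omega
  simp only [Function.comp_apply]
  rw [List.foldl_map, PySem.List.foldl_add, zero_add]
  congr 1
  apply List.map_congr_left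
  intro i hi
  rw [List.mem_range] at hi
  rw [PySem.Int.mod_eq_emod_of_pos (by exact_mod_cast hn)]
  have hcast : ((i : Int) + (j : Int)) % ((x.length : Nat) : Int) = (((i + j) % x.length : Nat) : Int) := by
    push_cast; rfl
  rw [hcast, PySem.List.pyGetD_natCast, PySem.List.pyGetD_natCast]

-- ===== VERDICT (by name: the statement is the Claim_ definition above) =====
theorem circular_correlation_spec : Claim_equal_circular_correlation := by
  intro x y _ hpre
  replace hpre : x.length ≤ y.length := hpre
  unfold Spec_circular_correlation circular_correlation_alt
  simp only []
  rw [show ((x.length : Int)) = ((x.length : Nat) : Int) from rfl]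
  rw [PySem.List.slice_to_natCast]
  have hstepeq : (fun (st : List Int × List Int) xi =>
      ((st.1.zip st.2).map (fun p => p.1 + xi * p.2),
       PySem.List.slice st.2 (some 1) none ++ PySem.List.slice st.2 none (some 1))) =
      (fun (st : List Int × List Int) xi =>
      ((st.1.zip st.2).map (fun p => p.1 + xi * p.2), pvRotL st.2)) := by
    funext st xi
    rw [PySem.List.slice_from_one, PySem.List.slice_to st.2 (by norm_num)]
    simp [pvRotL, List.drop_one]
  rw [hstepeq]
  have hyt : (y.take x.length).length = x.length := by simp; omega
  obtain ⟨hBlen, hBget⟩ := pvFoldB x (List.replicate x.length 0) (y.take x.length)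
    (by simp [hyt])
  rw [pvA_eq x y hpre]
  apply List.ext_getElem
  · simp [hBlen]
  · intro j h1 h2
    simp only [List.length_map, List.length_range] at h1
    rw [List.getElem_map, List.getElem_range]
    have hn : 0 < x.length := by omega
    rw [← List.getD_eq_getElem _ 0 h2]
    rw [hBget j (by simpa using h1)]
    rw [List.getD_eq_getElem _ 0 (by simpa using h1), List.getElem_replicate, zero_add]
    congr 1
    apply List.map_congr_left
    intro i hi
    rw [List.mem_range] at hi
    rw [pvRotL_iter_getD i (y.take x.length) j (by rw [hyt]; exact h1), hyt]
    have hm : (j + i) % x.length < x.length := Nat.mod_lt _ hn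
    congr 1
    rw [List.getD_eq_getElem _ 0 (show (i + j) % x.length < y.length by
          have := Nat.mod_lt (i + j) hn; omega),
        List.getD_eq_getElem _ 0 (by rw [hyt]; exact hm),
        List.getElem_take]
    congr 1
    rw [Nat.add_comm]
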